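-- pv_equiv track=rewrite | github.com/S2hyeyunS2/codingTest | 프로그래머스/1/42862. 체육복/체육복.py | solution
-- ===== SOURCE A (Python) =====
-- def solution(n, lost, reserve):
--
--     reserve_set = set(reserve) - set(lost)
--     lost_set = set(lost) - set(reserve)
--
--     for l in sorted(lost_set):
--         if l-1 in reserve_set:
--             reserve_set.remove(l-1)
--         elif l+1 in reserve_set:
--             reserve_set.remove(l+1)
--         else:
--             n -= 1
--
--     return n
-- ===== SOURCE B (Python) =====
-- def solution(n, lost, reserve):
--     # Parity-of-alternating-runs closed form: merge the two difference sets into one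
--     # sorted labeled sequence, split it into maximal runs of consecutive values with
--     # alternating lost/spare labels; a run leaves exactly one student without a
--     # uniform iff its length is odd and it starts (hence ends) with a lost student.
--     lost_set, reserve_set = set(lost), set(reserve)
--     fails = 0
--     run_len = 0
--     run_start_lost = False
--     prev = 0
--     prev_lost = False
--     for v in sorted(lost_set ^ reserve_set):
--         is_lost = v in lost_set
--         if run_len and v == prev + 1 and is_lost != prev_lost:
--             run_len += 1
--         else:
--             if run_len % 2 == 1 and run_start_lost:
--                 fails += 1
--             run_len = 1
--             run_start_lost = is_lost
--         prev, prev_lost = v, is_lost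
--     if run_len % 2 == 1 and run_start_lost:
--         fails += 1
--     return n - fails
-- ===== Notes on version B (the rewrite author's own statement) =====
-- stated objective: alternative
-- what changed: Replaces A's greedy matching simulation (scan sorted unmatched-lost, mutably removing l-1 or l+1 from the reserve set) by a closed form: merge both difference sets into one sorted labeled sequence, split it into maximal runs of consecutive values with alternating lost/spare labels, and count one failure per odd-length run that starts with a lost student.
import Mathlib
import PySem

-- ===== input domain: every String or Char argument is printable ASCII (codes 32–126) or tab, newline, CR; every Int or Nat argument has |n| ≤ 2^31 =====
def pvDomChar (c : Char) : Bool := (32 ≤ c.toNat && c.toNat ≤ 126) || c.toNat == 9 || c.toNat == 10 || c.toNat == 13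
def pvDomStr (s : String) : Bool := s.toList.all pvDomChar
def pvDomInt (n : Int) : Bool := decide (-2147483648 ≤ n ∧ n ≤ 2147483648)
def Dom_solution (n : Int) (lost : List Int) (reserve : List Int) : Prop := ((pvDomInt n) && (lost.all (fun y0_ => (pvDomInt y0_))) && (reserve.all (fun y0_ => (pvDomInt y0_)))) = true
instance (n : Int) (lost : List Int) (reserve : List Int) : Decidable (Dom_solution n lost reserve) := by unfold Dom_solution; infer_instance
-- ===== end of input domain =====

-- B replaces A's greedy matching simulation (sorted unmatched-lost scan with a mutable
-- reserve set) by a closed form: it merges both difference sets into one sorted labeled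
-- sequence, splits it into maximal runs of consecutive values with alternating
-- lost/spare labels, and counts one failure per run that is odd-length and starts with
-- a lost student; objective: alternative (same behaviour, no matching simulation).

-- ===== PORT A =====
-- '.remove(x)' only runs under the 'x in set' guard, where it equals discard (exact).
def stepA (st : PySem.Set Int × Int) (l : Int) : PySem.Set Int × Int :=
  if PySem.Set.contains st.1 (l - 1) then (PySem.Set.discard st.1 (l - 1), st.2)
  else if PySem.Set.contains st.1 (l + 1) then (PySem.Set.discard st.1 (l + 1), st.2)
  else (st.1, st.2 - 1)

def solution (n : Int) (lost : List Int) (reserve : List Int) : Int :=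
  let reserveSet : PySem.Set Int := PySem.Set.diff (PySem.Set.ofList reserve) (PySem.Set.ofList lost)
  let lostSet : PySem.Set Int := PySem.Set.diff (PySem.Set.ofList lost) (PySem.Set.ofList reserve)
  ((PySem.List.sorted lostSet (fun x => x) false).foldl stepA (reserveSet, n)).2

-- ===== PORT B =====
-- the five loop variables of Source B
structure BState where
  fails : Int
  runLen : Int
  startLost : Bool
  prev : Int
  prevLost : Bool
deriving Repr, DecidableEq

-- 'if run_len % 2 == 1 and run_start_lost: fails += 1' contributes this amount
def pendB (st : BState) : Int :=
  if PySem.Int.mod st.runLen 2 == 1 && st.startLost then 1 else 0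

-- the body of Source B's for-loop
def stepB (lostSet : PySem.Set Int) (st : BState) (v : Int) : BState :=
  let isLost := PySem.Set.contains lostSet v
  if st.runLen != 0 && v == st.prev + 1 && isLost != st.prevLost then
    { st with runLen := st.runLen + 1, prev := v, prevLost := isLost }
  else
    { fails := st.fails + pendB st, runLen := 1, startLost := isLost,
      prev := v, prevLost := isLost }

def solution_alt (n : Int) (lost : List Int) (reserve : List Int) : Int :=
  let lostSet : PySem.Set Int := PySem.Set.ofList lost
  let reserveSet : PySem.Set Int := PySem.Set.ofList reserve
  let fin := (PySem.List.sorted (PySem.Set.symmDiff lostSet reserveSet) (fun x => x) false).foldl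
    (stepB lostSet) ⟨0, 0, false, 0, false⟩
  n - (fin.fails + pendB fin)

-- ===== PRECONDITION & SPEC =====
def Spec_solution (n : Int) (lost : List Int) (reserve : List Int) (out : Int) : Prop := out = solution_alt n lost reserve
instance (n : Int) (lost : List Int) (reserve : List Int) (out : Int) : Decidable (Spec_solution n lost reserve out) := by unfold Spec_solution; infer_instance

-- ===== CLAIM (what is proved, stated in full; the proofs are below) =====
def Claim_equal_solution : Prop := ∀ (n : Int) (lost : List Int) (reserve : List Int), Dom_solution n lost reserve → Spec_solution n lost reserve (solution n lost reserve)

-- ===== LEMMAS AND PROOFS =====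

-- B's step on a value-with-label pair (the label of v is 'v in lost_set', precomputed)
def stepL (st : BState) : Int × Bool → BState
  | (v, lab) =>
    if st.runLen ≠ 0 ∧ v = st.prev + 1 ∧ lab ≠ st.prevLost then
      { st with runLen := st.runLen + 1, prev := v, prevLost := lab }
    else
      { fails := st.fails + pendB st, runLen := 1, startLost := lab,
        prev := v, prevLost := lab }

def RvalMem (es : List (Int × Bool)) (x : Int) : Prop := ∃ e ∈ es, e.2 = false ∧ e.1 = x
def DadjMem (es : List (Int × Bool)) (x : Int) : Prop := ∃ e ∈ es, e.2 = true ∧ (x = e.1 - 1 ∨ x = e.1 + 1)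

theorem adj_head (tl : List (Int × Bool)) (v : Int) (e : Int × Bool)
    (hpw : tl.Pairwise (fun a b => a.1 < b.1)) (hgt : ∀ e' ∈ tl, v < e'.1)
    (he : e ∈ tl) (hv : e.1 = v + 1) : tl.head? = some e := by
  cases tl with
  | nil => cases he
  | cons h t =>
      rcases List.mem_cons.mp he with rfl | het
      · rfl
      · have h1 : h.1 < e.1 := (List.pairwise_cons.mp hpw).1 e het
        have h2 : v < h.1 := hgt h List.mem_cons_self
        omega

theorem main_inv (N : Nat) (es : List (Int × Bool)) (hlen : es.length ≤ N)
    (rs : PySem.Set Int) (cnt : Int) (st : BState)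
    (h1 : es.Pairwise (fun a b => a.1 < b.1))
    (h2 : ∀ x : Int, DadjMem es x → (x ∈ rs ↔ RvalMem es x))
    (h3 : 0 ≤ st.runLen)
    (h4 : st.runLen ≠ 0 → st.prevLost = (st.startLost == (PySem.Int.mod st.runLen 2 == 1)))
    (h5 : st.runLen ≠ 0 → ∀ e ∈ es, st.prev < e.1)
    (h6 : ∀ v, es.head? = some (v, true) → st.runLen ≠ 0 → st.prev = v - 1 →
        st.prevLost = false → st.startLost = true)
    (h7 : ∀ v, es.head? = some (v, false) → st.runLen ≠ 0 → st.prev = v - 1 →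
        st.prevLost = true → st.startLost = false) :
    (((es.filter (fun e => e.2)).map (fun e => e.1)).foldl stepA (rs, cnt)).2
        + ((es.foldl stepL st).fails + pendB (es.foldl stepL st))
      = cnt + (st.fails + pendB st) := by
  induction N generalizing es rs cnt st with
  | zero =>
      have : es = [] := List.length_eq_zero_iff.mp (Nat.le_zero.mp hlen)
      subst this
      simp
  | succ N ih =>
      have hmod2 : ∀ r : Int, PySem.Int.mod r 2 = r % 2 :=
        fun r => PySem.Int.mod_eq_emod_of_pos (by norm_num)
      cases es with
      | nil => simp
      | cons e0 tl =>
        obtain ⟨v, b⟩ := e0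
        have htlpw : tl.Pairwise (fun a b => a.1 < b.1) := (List.pairwise_cons.mp h1).2
        have hvlt : ∀ e ∈ tl, v < e.1 := (List.pairwise_cons.mp h1).1
        have hlentl : tl.length ≤ N := by simp at hlen; omega
        cases b with
        | true =>
          -- head is an unmatched lost student at v; A first probes v-1 (never a spare here)
          have hnm1 : (v - 1) ∉ rs := by
            intro hx
            obtain ⟨e, he, hef, hev⟩ :=
              (h2 (v - 1) ⟨(v, true), List.mem_cons_self, rfl, Or.inl rfl⟩).mp hx
            rcases List.mem_cons.mp he with rfl | het
            · simp at hef
            · have := hvlt e het; omega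
          by_cases hpair : tl.head? = some (v + 1, false)
          · -- (lost v, spare v+1) pair: A matches to the right, B extends the run twice
            obtain ⟨tl', rfl⟩ : ∃ tl', tl = (v + 1, false) :: tl' := by
              cases tl with
              | nil => simp at hpair
              | cons h t => exact ⟨t, by simpa using hpair⟩
            have htl'pw : tl'.Pairwise (fun a b => a.1 < b.1) := (List.pairwise_cons.mp htlpw).2
            have hv1lt : ∀ e ∈ tl', v + 1 < e.1 := (List.pairwise_cons.mp htlpw).1
            have hlen' : tl'.length ≤ N := by simp at hlen; omega
            have hp1 : (v + 1) ∈ rs :=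
              (h2 (v + 1) ⟨(v, true), List.mem_cons_self, rfl, Or.inr rfl⟩).mpr
                ⟨(v + 1, false), List.mem_cons_of_mem _ List.mem_cons_self, rfl, rfl⟩
            have hstepA : stepA (rs, cnt) v = (PySem.Set.discard rs (v + 1), cnt) := by
              simp [stepA, hnm1, hp1]
            have h2' : ∀ x, DadjMem tl' x → (x ∈ PySem.Set.discard rs (v + 1) ↔ RvalMem tl' x) := by
              rintro x ⟨e, he, het, hadj⟩
              rw [PySem.Set.mem_discard]
              by_cases hxv1 : x = v + 1
              · constructor
                · rintro ⟨-, h⟩; exact absurd hxv1 h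
                · rintro ⟨e', he', -, hev'⟩
                  have := hv1lt e' he'; omega
              · have hes : x ∈ rs ↔ RvalMem ((v, true) :: (v + 1, false) :: tl') x :=
                  h2 x ⟨e, by simp [he], het, hadj⟩
                constructor
                · rintro ⟨hx, -⟩
                  obtain ⟨e', he', hef', hev'⟩ := hes.mp hx
                  rcases List.mem_cons.mp he' with rfl | he'
                  · simp at hef'
                  · rcases List.mem_cons.mp he' with rfl | he'
                    · exact absurd hev'.symm hxv1
                    · exact ⟨e', he', hef', hev'⟩
                · rintro ⟨e', he', hef', hev'⟩
                  exact ⟨hes.mpr ⟨e', by simp [he'], hef', hev'⟩, hxv1⟩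
            have hfil : (((v, true) :: (v + 1, false) :: tl').filter (fun e => e.2)).map (fun e => e.1)
                = v :: (tl'.filter (fun e => e.2)).map (fun e => e.1) := by simp
            by_cases hg1 : st.runLen ≠ 0 ∧ v = st.prev + 1 ∧ (true : Bool) ≠ st.prevLost
            · have hpl : st.prevLost = false := by
                rcases hg1 with ⟨-, -, h⟩; revert h; cases st.prevLost <;> simp
              have hsl : st.startLost = true := h6 v rfl hg1.1 (by omega) hpl
              have hpar : st.runLen % 2 = 0 := by
                have h := h4 hg1.1
                rw [hpl, hsl, hmod2] at h
                by_contra hc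
                rw [show st.runLen % 2 = 1 from by omega] at h
                simp at h
              have hst1 : stepL st (v, true)
                  = { st with runLen := st.runLen + 1, prev := v, prevLost := true } := by
                simp only [stepL]
                rw [if_pos ⟨hg1.1, hg1.2.1, by simp [hpl]⟩]
              have hst2 : stepL (stepL st (v, true)) (v + 1, false)
                  = { st with runLen := st.runLen + 2, prev := v + 1, prevLost := false } := by
                rw [hst1]
                simp only [stepL]
                rw [if_pos ⟨by simp; omega, by simp, by simp⟩]
                simp
                omega
              have hpend0 : pendB st = 0 := by simp [pendB, hsl, hpar]
              have hpend2 : pendB ({ st with runLen := st.runLen + 2, prev := v + 1, prevLost := false } : BState) = 0 := by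
                simp [pendB, show (st.runLen + 2) % 2 = 0 from by omega]
              have key := ih tl' hlen' (PySem.Set.discard rs (v + 1)) cnt
                { st with runLen := st.runLen + 2, prev := v + 1, prevLost := false }
                htl'pw h2' (by simp; omega)
                (by intro _
                    simp only
                    simp [hsl, show (st.runLen + 2) % 2 = 0 from by omega])
                (by intro _ e he; exact hv1lt e he)
                (by intro w hw _ _ _; exact hsl)
                (by intro w hw _ _ hc; simp at hc)
              rw [hfil, List.foldl_cons, hstepA, List.foldl_cons, List.foldl_cons, hst2,
                key, hpend0, hpend2]
            · have hst1 : stepL st (v, true)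
                  = { fails := st.fails + pendB st, runLen := 1, startLost := true, prev := v, prevLost := true } := by
                simp only [stepL]
                rw [if_neg hg1]
              have hst2 : stepL (stepL st (v, true)) (v + 1, false)
                  = { fails := st.fails + pendB st, runLen := 2, startLost := true, prev := v + 1, prevLost := false } := by
                rw [hst1]
                simp only [stepL]
                rw [if_pos ⟨by norm_num, by simp, by simp⟩]
                norm_num
              have hpend2 : pendB ({ fails := st.fails + pendB st, runLen := 2, startLost := true, prev := v + 1, prevLost := false } : BState) = 0 := rfl
              have key := ih tl' hlen' (PySem.Set.discard rs (v + 1)) cnt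
                { fails := st.fails + pendB st, runLen := 2, startLost := true, prev := v + 1, prevLost := false }
                htl'pw h2' (by norm_num)
                (by intro _; rfl)
                (by intro _ e he; exact hv1lt e he)
                (by intro w hw _ _ _; rfl)
                (by intro w hw _ _ hc; simp at hc)
              rw [hfil, List.foldl_cons, hstepA, List.foldl_cons, List.foldl_cons, hst2,
                key, hpend2]
              simp
          · -- lone lost student at v: A fails immediately, B's run turns odd-starting-lost
            have hnp1 : (v + 1) ∉ rs := by
              intro hx
              obtain ⟨e, he, hef, hev⟩ :=
                (h2 (v + 1) ⟨(v, true), List.mem_cons_self, rfl, Or.inr rfl⟩).mp hx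
              rcases List.mem_cons.mp he with rfl | het
              · simp at hef
              · obtain ⟨a, c⟩ := e
                simp only at hef hev
                subst hef hev
                exact hpair (adj_head tl v _ htlpw hvlt het rfl)
            have hstepA : stepA (rs, cnt) v = (rs, cnt - 1) := by
              simp [stepA, hnm1, hnp1]
            have h2' : ∀ x, DadjMem tl x → (x ∈ rs ↔ RvalMem tl x) := by
              rintro x ⟨e, he, het, hadj⟩
              have hes : x ∈ rs ↔ RvalMem ((v, true) :: tl) x :=
                h2 x ⟨e, by simp [he], het, hadj⟩
              rw [hes]
              constructor
              · rintro ⟨e', he', hef', hev'⟩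
                rcases List.mem_cons.mp he' with rfl | he'
                · simp at hef'
                · exact ⟨e', he', hef', hev'⟩
              · rintro ⟨e', he', hef', hev'⟩
                exact ⟨e', by simp [he'], hef', hev'⟩
            have hfil : (((v, true) :: tl).filter (fun e => e.2)).map (fun e => e.1)
                = v :: (tl.filter (fun e => e.2)).map (fun e => e.1) := by simp
            have h7tl : ∀ (w : Int) (stx : BState), stx.prev = v →
                tl.head? = some (w, false) → stx.runLen ≠ 0 → stx.prev = w - 1 →
                stx.prevLost = true → stx.startLost = false := by
              intro w stx hp hw _ hpw _
              exact absurd hw (by rw [show w = v + 1 from by omega]; exact hpair)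
            by_cases hg1 : st.runLen ≠ 0 ∧ v = st.prev + 1 ∧ (true : Bool) ≠ st.prevLost
            · have hpl : st.prevLost = false := by
                rcases hg1 with ⟨-, -, h⟩; revert h; cases st.prevLost <;> simp
              have hsl : st.startLost = true := h6 v rfl hg1.1 (by omega) hpl
              have hpar : st.runLen % 2 = 0 := by
                have h := h4 hg1.1
                rw [hpl, hsl, hmod2] at h
                by_contra hc
                rw [show st.runLen % 2 = 1 from by omega] at h
                simp at h
              have hst1 : stepL st (v, true)
                  = { st with runLen := st.runLen + 1, prev := v, prevLost := true } := by
                simp only [stepL]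
                rw [if_pos ⟨hg1.1, hg1.2.1, by simp [hpl]⟩]
              have hpend0 : pendB st = 0 := by simp [pendB, hsl, hpar]
              have hpend1 : pendB ({ st with runLen := st.runLen + 1, prev := v, prevLost := true } : BState) = 1 := by
                simp [pendB, hsl, show (st.runLen + 1) % 2 = 1 from by omega]
              have key := ih tl hlentl rs (cnt - 1)
                { st with runLen := st.runLen + 1, prev := v, prevLost := true }
                htlpw h2' (by simp; omega)
                (by intro _
                    simp [hsl, show (st.runLen + 1) % 2 = 1 from by omega])
                (by intro _ e he; exact hvlt e he)
                (by intro w hw _ _ hc; simp at hc)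
                (fun w => h7tl w _ rfl)
              rw [hfil, List.foldl_cons, hstepA, List.foldl_cons, hst1, key, hpend0, hpend1]
              simp
            · have hst1 : stepL st (v, true)
                  = { fails := st.fails + pendB st, runLen := 1, startLost := true, prev := v, prevLost := true } := by
                simp only [stepL]
                rw [if_neg hg1]
              have hpend1 : pendB ({ fails := st.fails + pendB st, runLen := 1, startLost := true, prev := v, prevLost := true } : BState) = 1 := rfl
              have key := ih tl hlentl rs (cnt - 1)
                { fails := st.fails + pendB st, runLen := 1, startLost := true, prev := v, prevLost := true }
                htlpw h2' (by norm_num)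
                (by intro _; rfl)
                (by intro _ e he; exact hvlt e he)
                (by intro w hw _ _ hc; simp at hc)
                (fun w => h7tl w _ rfl)
              rw [hfil, List.foldl_cons, hstepA, List.foldl_cons, hst1, key, hpend1]
              simp
        | false =>
          by_cases hpair : tl.head? = some (v + 1, true)
          · -- (spare v, lost v+1) pair: A matches to the left, B extends the run twice
            obtain ⟨tl', rfl⟩ : ∃ tl', tl = (v + 1, true) :: tl' := by
              cases tl with
              | nil => simp at hpair
              | cons h t => exact ⟨t, by simpa using hpair⟩
            have htl'pw : tl'.Pairwise (fun a b => a.1 < b.1) := (List.pairwise_cons.mp htlpw).2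
            have hv1lt : ∀ e ∈ tl', v + 1 < e.1 := (List.pairwise_cons.mp htlpw).1
            have hlen' : tl'.length ≤ N := by simp at hlen; omega
            have hpv : v ∈ rs :=
              (h2 v ⟨(v + 1, true), List.mem_cons_of_mem _ List.mem_cons_self, rfl, Or.inl (by ring_nf)⟩).mpr
                ⟨(v, false), List.mem_cons_self, rfl, rfl⟩
            have hstepA : stepA (rs, cnt) (v + 1) = (PySem.Set.discard rs v, cnt) := by
              simp [stepA, hpv]
            have h2' : ∀ x, DadjMem tl' x → (x ∈ PySem.Set.discard rs v ↔ RvalMem tl' x) := by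
              rintro x ⟨e, he, het, hadj⟩
              have hegt : v + 1 < e.1 := hv1lt e he
              have hxgt : v < x := by omega
              rw [PySem.Set.mem_discard]
              have hes : x ∈ rs ↔ RvalMem ((v, false) :: (v + 1, true) :: tl') x :=
                h2 x ⟨e, by simp [he], het, hadj⟩
              constructor
              · rintro ⟨hx, -⟩
                obtain ⟨e', he', hef', hev'⟩ := hes.mp hx
                rcases List.mem_cons.mp he' with rfl | he'
                · simp only at hev'; omega
                · rcases List.mem_cons.mp he' with rfl | he'
                  · simp at hef'
                  · exact ⟨e', he', hef', hev'⟩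
              · rintro ⟨e', he', hef', hev'⟩
                refine ⟨hes.mpr ⟨e', by simp [he'], hef', hev'⟩, by omega⟩
            have hfil : (((v, false) :: (v + 1, true) :: tl').filter (fun e => e.2)).map (fun e => e.1)
                = (v + 1) :: (tl'.filter (fun e => e.2)).map (fun e => e.1) := by simp
            by_cases hg1 : st.runLen ≠ 0 ∧ v = st.prev + 1 ∧ (false : Bool) ≠ st.prevLost
            · have hpl : st.prevLost = true := by
                rcases hg1 with ⟨-, -, h⟩; revert h; cases st.prevLost <;> simp
              have hsl : st.startLost = false := h7 v rfl hg1.1 (by omega) hpl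
              have hpar : st.runLen % 2 = 0 := by
                have h := h4 hg1.1
                rw [hpl, hsl, hmod2] at h
                by_contra hc
                rw [show st.runLen % 2 = 1 from by omega] at h
                simp at h
              have hst1 : stepL st (v, false)
                  = { st with runLen := st.runLen + 1, prev := v, prevLost := false } := by
                simp only [stepL]
                rw [if_pos ⟨hg1.1, hg1.2.1, by simp [hpl]⟩]
              have hst2 : stepL (stepL st (v, false)) (v + 1, true)
                  = { st with runLen := st.runLen + 2, prev := v + 1, prevLost := true } := by
                rw [hst1]
                simp only [stepL]
                rw [if_pos ⟨by simp; omega, by simp, by simp⟩]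
                simp
                omega
              have hpend0 : pendB st = 0 := by simp [pendB, hsl]
              have hpend2 : pendB ({ st with runLen := st.runLen + 2, prev := v + 1, prevLost := true } : BState) = 0 := by
                simp [pendB, hsl]
              have key := ih tl' hlen' (PySem.Set.discard rs v) cnt
                { st with runLen := st.runLen + 2, prev := v + 1, prevLost := true }
                htl'pw h2' (by simp; omega)
                (by intro _
                    simp [hsl, show (st.runLen + 2) % 2 = 0 from by omega])
                (by intro _ e he; exact hv1lt e he)
                (by intro w hw _ _ hc; simp at hc)
                (by intro w hw _ _ _; exact hsl)
              rw [hfil, List.foldl_cons, hstepA, List.foldl_cons, List.foldl_cons, hst2,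
                key, hpend0, hpend2]
            · have hst1 : stepL st (v, false)
                  = { fails := st.fails + pendB st, runLen := 1, startLost := false, prev := v, prevLost := false } := by
                simp only [stepL]
                rw [if_neg hg1]
              have hst2 : stepL (stepL st (v, false)) (v + 1, true)
                  = { fails := st.fails + pendB st, runLen := 2, startLost := false, prev := v + 1, prevLost := true } := by
                rw [hst1]
                simp only [stepL]
                rw [if_pos ⟨by norm_num, by simp, by simp⟩]
                norm_num
              have hpend2 : pendB ({ fails := st.fails + pendB st, runLen := 2, startLost := false, prev := v + 1, prevLost := true } : BState) = 0 := rfl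
              have key := ih tl' hlen' (PySem.Set.discard rs v) cnt
                { fails := st.fails + pendB st, runLen := 2, startLost := false, prev := v + 1, prevLost := true }
                htl'pw h2' (by norm_num)
                (by intro _; rfl)
                (by intro _ e he; exact hv1lt e he)
                (by intro w hw _ _ hc; simp at hc)
                (by intro w hw _ _ _; rfl)
              rw [hfil, List.foldl_cons, hstepA, List.foldl_cons, List.foldl_cons, hst2,
                key, hpend2]
              simp
          · -- lone spare at v: A ignores it (never probed again), B extends or starts a run
            have h2' : ∀ x, DadjMem tl x → (x ∈ rs ↔ RvalMem tl x) := by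
              rintro x ⟨e, he, het, hadj⟩
              have hxv : x ≠ v := by
                intro hxv
                rcases hadj with hL | hR
                · have hev1 : e.1 = v + 1 := by omega
                  obtain ⟨a, c⟩ := e
                  simp only at het hev1
                  subst het hev1
                  exact hpair (adj_head tl v _ htlpw hvlt he rfl)
                · have := hvlt e he; omega
              have hes : x ∈ rs ↔ RvalMem ((v, false) :: tl) x :=
                h2 x ⟨e, by simp [he], het, hadj⟩
              rw [hes]
              constructor
              · rintro ⟨e', he', hef', hev'⟩
                rcases List.mem_cons.mp he' with rfl | he'
                · simp only at hev'; exact absurd hev'.symm hxv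
                · exact ⟨e', he', hef', hev'⟩
              · rintro ⟨e', he', hef', hev'⟩
                exact ⟨e', by simp [he'], hef', hev'⟩
            have hfil : (((v, false) :: tl).filter (fun e => e.2)).map (fun e => e.1)
                = (tl.filter (fun e => e.2)).map (fun e => e.1) := by simp
            have h6tl : ∀ (w : Int) (stx : BState), stx.prev = v →
                tl.head? = some (w, true) → stx.runLen ≠ 0 → stx.prev = w - 1 →
                stx.prevLost = false → stx.startLost = true := by
              intro w stx hp hw _ hpw _
              exact absurd hw (by rw [show w = v + 1 from by omega]; exact hpair)
            by_cases hg1 : st.runLen ≠ 0 ∧ v = st.prev + 1 ∧ (false : Bool) ≠ st.prevLost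
            · have hpl : st.prevLost = true := by
                rcases hg1 with ⟨-, -, h⟩; revert h; cases st.prevLost <;> simp
              have hsl : st.startLost = false := h7 v rfl hg1.1 (by omega) hpl
              have hpar : st.runLen % 2 = 0 := by
                have h := h4 hg1.1
                rw [hpl, hsl, hmod2] at h
                by_contra hc
                rw [show st.runLen % 2 = 1 from by omega] at h
                simp at h
              have hst1 : stepL st (v, false)
                  = { st with runLen := st.runLen + 1, prev := v, prevLost := false } := by
                simp only [stepL]
                rw [if_pos ⟨hg1.1, hg1.2.1, by simp [hpl]⟩]
              have hpend0 : pendB st = 0 := by simp [pendB, hsl]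
              have hpend1 : pendB ({ st with runLen := st.runLen + 1, prev := v, prevLost := false } : BState) = 0 := by
                simp [pendB, hsl]
              have key := ih tl hlentl rs cnt
                { st with runLen := st.runLen + 1, prev := v, prevLost := false }
                htlpw h2' (by simp; omega)
                (by intro _
                    simp [hsl, show (st.runLen + 1) % 2 = 1 from by omega])
                (by intro _ e he; exact hvlt e he)
                (fun w => h6tl w _ rfl)
                (by intro w hw _ _ hc; simp at hc)
              rw [hfil, List.foldl_cons, hst1, key, hpend0, hpend1]
            · have hst1 : stepL st (v, false)
                  = { fails := st.fails + pendB st, runLen := 1, startLost := false, prev := v, prevLost := false } := by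
                simp only [stepL]
                rw [if_neg hg1]
              have hpend1 : pendB ({ fails := st.fails + pendB st, runLen := 1, startLost := false, prev := v, prevLost := false } : BState) = 0 := rfl
              have key := ih tl hlentl rs cnt
                { fails := st.fails + pendB st, runLen := 1, startLost := false, prev := v, prevLost := false }
                htlpw h2' (by norm_num)
                (by intro _; rfl)
                (by intro _ e he; exact hvlt e he)
                (fun w => h6tl w _ rfl)
                (by intro w hw _ _ hc; simp at hc)
              rw [hfil, List.foldl_cons, hst1, key, hpend1]
              simp

theorem stepB_eq_stepL (S : PySem.Set Int) (st : BState) (v : Int) :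
    stepB S st v = stepL st (v, PySem.Set.contains S v) := by
  simp only [stepB, stepL, bne, ne_eq]
  by_cases h1 : st.runLen = 0 <;> by_cases h2 : v = st.prev + 1 <;>
    by_cases h3 : PySem.Set.contains S v = st.prevLost <;>
      simp_all

theorem foldl_stepB_eq_stepL (S : PySem.Set Int) (vs : List Int) (st : BState) :
    vs.foldl (stepB S) st = (vs.map (fun v => (v, PySem.Set.contains S v))).foldl stepL st := by
  rw [List.foldl_map]
  congr 1
  funext s v
  exact stepB_eq_stepL S s v

theorem solution_eq_alt (n : Int) (lost : List Int) (reserve : List Int) :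
    solution n lost reserve = solution_alt n lost reserve := by
  simp only [solution, solution_alt]
  set S : PySem.Set Int := PySem.Set.ofList lost with hS
  set R : PySem.Set Int := PySem.Set.ofList reserve with hR
  set M : List Int := PySem.List.sorted (PySem.Set.symmDiff S R) (fun x => x) false with hM
  set es : List (Int × Bool) := M.map (fun v => (v, PySem.Set.contains S v)) with hes
  have hsd : (PySem.Set.symmDiff S R).Nodup :=
    PySem.Set.nodup_symmDiff S R (PySem.Set.nodup_ofList lost) (PySem.Set.nodup_ofList reserve)
  have hMnd : M.Nodup := ((PySem.List.sorted_perm _ _ _).nodup_iff).mpr hsd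
  have hle : M.Pairwise (fun a b => a ≤ b) := PySem.List.sorted_pairwise _ _
  have hMpw : M.Pairwise (· < ·) := (hle.and hMnd).imp (fun h => lt_of_le_of_ne h.1 h.2)
  have h1 : es.Pairwise (fun a b => a.1 < b.1) := List.Pairwise.map _ (fun a b h => h) hMpw
  have hmemM : ∀ x, x ∈ M ↔ (x ∈ lost ∧ x ∉ reserve) ∨ (x ∈ reserve ∧ x ∉ lost) := by
    intro x
    simp [hM, PySem.List.mem_sorted, PySem.Set.mem_symmDiff, hS, hR, PySem.Set.mem_ofList]
  have hlab : ∀ v, (PySem.Set.contains S v = true) ↔ v ∈ lost := by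
    intro v
    rw [PySem.Set.contains_iff, hS, PySem.Set.mem_ofList]
  have h2 : ∀ x : Int, x ∈ PySem.Set.diff R S ↔ RvalMem es x := by
    intro x
    rw [PySem.Set.mem_diff, hR, hS, PySem.Set.mem_ofList, PySem.Set.mem_ofList]
    constructor
    · rintro ⟨hxR, hxS⟩
      refine ⟨(x, PySem.Set.contains S x), ?_, ?_, rfl⟩
      · rw [hes]
        exact List.mem_map.mpr ⟨x, (hmemM x).mpr (Or.inr ⟨hxR, hxS⟩), rfl⟩
      · exact Bool.eq_false_iff.mpr (fun h => hxS ((hlab x).mp h))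
    · rintro ⟨e, he, hef, hev⟩
      rw [hes] at he
      obtain ⟨w, hw, rfl⟩ := List.mem_map.mp he
      simp only at hef hev
      subst hev
      rcases (hmemM w).mp hw with ⟨hl, -⟩ | ⟨hr, hnl⟩
      · exact absurd ((hlab w).mpr hl) (by rw [hef]; simp)
      · exact ⟨hr, hnl⟩
  have hds1 : (es.filter (fun e => e.2)).map (fun e => e.1)
      = M.filter (fun v => PySem.Set.contains S v) := by
    rw [hes, List.filter_map, List.map_map]
    simp [Function.comp_def]
  have hperm2 : (M.filter (fun v => PySem.Set.contains S v)).Perm (PySem.Set.diff S R) := by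
    refine (List.perm_ext_iff_of_nodup (hMnd.filter _)
      (PySem.Set.nodup_diff S R (PySem.Set.nodup_ofList lost))).mpr ?_
    intro x
    rw [List.mem_filter, PySem.Set.mem_diff, hS, hR, PySem.Set.mem_ofList, PySem.Set.mem_ofList,
      hmemM, hlab]
    tauto
  have hpwf : (M.filter (fun v => PySem.Set.contains S v)).Pairwise (· < ·) :=
    List.Pairwise.sublist List.filter_sublist hMpw
  have hDs : PySem.List.sorted (PySem.Set.diff S R) (fun x => x) false
      = (es.filter (fun e => e.2)).map (fun e => e.1) := by
    rw [hds1]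
    exact PySem.List.sorted_eq_of_perm_of_pairwise_lt _ _ _ hperm2 hpwf
  have key := main_inv es.length es le_rfl (PySem.Set.diff R S) n ⟨0, 0, false, 0, false⟩
    h1 (fun x _ => h2 x) (by norm_num)
    (by intro h; simp at h)
    (by intro h; simp at h)
    (by intro w hw h; simp at h)
    (by intro w hw h; simp at h)
  rw [hDs, foldl_stepB_eq_stepL, ← hes]
  have hpend0 : pendB ⟨0, 0, false, 0, false⟩ = 0 := rfl
  have hf0 : (⟨0, 0, false, 0, false⟩ : BState).fails = 0 := rfl
  rw [hpend0, hf0] at key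
  omega

-- ===== VERDICT (by name: the statement is the Claim_ definition above) =====
theorem solution_spec : Claim_equal_solution := by
  intro n lost reserve _
  unfold Spec_solution
  exact solution_eq_alt n lost reserve
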